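-- pv_equiv track=rewrite | github.com/ForeverHYX/CNlab5 | tests/full_feature_test.py | _extract_client_id
-- ===== SOURCE A (Python) =====
-- from typing import List, Optional, Tuple
--
-- def _extract_client_id(text: str) -> Optional[int]:
--     if "#" not in text:
--         return None
--     part = text.split("#", 1)[1]
--     digits = ""
--     for ch in part:
--         if ch.isdigit():
--             digits += ch
--         else:
--             break
--     try:
--         return int(digits)
--     except ValueError:
--         return None
-- ===== SOURCE B (Python) =====
-- import re
-- from typing import Optional
--
-- _CLIENT_ID_RE = re.compile(r'#(\d*)')
--
--
-- def _extract_client_id(text: str) -> Optional[int]: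
--     # One regex over the whole string: re.search finds the leftmost match,
--     # i.e. the FIRST '#', and the greedy \d* captures exactly the maximal
--     # digit run right after it (possibly empty). No membership test, no
--     # split/slicing, no hand-written character loop, no try/except.
--     m = _CLIENT_ID_RE.search(text)
--     return int(m.group(1)) if m and m.group(1) else None
-- ===== Notes on version B (the rewrite author's own statement) =====
-- stated objective: idiomatic
-- what changed: Replaces the membership test + split + hand-written digit-accumulating loop + try/except with one compiled regex search (hash followed by a greedy digit group) whose leftmost match anchors at the first hash and captures the maximal digit run, then a single guarded int() on the group.
import Mathlib
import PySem

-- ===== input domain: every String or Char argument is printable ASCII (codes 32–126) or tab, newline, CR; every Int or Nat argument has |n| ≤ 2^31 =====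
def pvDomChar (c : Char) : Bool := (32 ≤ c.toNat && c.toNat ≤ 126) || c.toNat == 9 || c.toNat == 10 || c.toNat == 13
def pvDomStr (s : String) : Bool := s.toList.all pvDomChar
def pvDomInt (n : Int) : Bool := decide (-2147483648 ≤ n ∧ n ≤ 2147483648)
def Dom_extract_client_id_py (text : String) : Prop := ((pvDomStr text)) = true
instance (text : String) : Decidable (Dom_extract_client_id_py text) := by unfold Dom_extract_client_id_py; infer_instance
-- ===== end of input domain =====

-- B replaces A's membership test + split + digit-accumulating loop + try/except by a single
-- regex search r'#(\d*)' and one guarded int() on the captured group (idiomatic).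

-- ===== PORT A =====
-- the 'for ch in part: if ch.isdigit(): digits += ch else: break' loop of A
def aDigits (l : List Char) (digits : String) : String :=
  match l with
  | [] => digits
  | c :: rest => if PySem.Chars.isdigit c then aDigits rest (digits.push c) else digits

def extract_client_id_py (text : String) : Option Int :=
  if PySem.Str.isIn "#" text = false then none
  else
    -- text.split("#", 1)[1]; split never raises here (sep ≠ ""), getD [] only totalizes
    let part := PySem.List.pyGetD ((PySem.Str.splitMax? text "#" 1).getD []) 1 ""
    let digits := aDigits part.toList ""
    -- try: return int(digits) except ValueError: return None
    PySem.Int.ofStr? digits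

-- ===== PORT B =====
-- re.search(r'#(\d*)', text): the leftmost match starts at the FIRST '#'; the greedy '\d*'
-- captures the maximal digit run right after it. Exact for this fixed pattern on the ASCII
-- domain (where '\d' and str.isdigit both mean '0'..'9'); none = no match (no '#').
def reSearchHashDigits (cs : List Char) : Option (List Char) :=
  match cs with
  | [] => none
  | c :: rest =>
    if c = '#' then some (rest.takeWhile PySem.Chars.isdigit)
    else reSearchHashDigits rest

def extract_client_id_py_alt (text : String) : Option Int :=
  match reSearchHashDigits text.toList with
  | none => none                                   -- m is None
  | some g =>
    if g = [] then none                            -- m.group(1) falsy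
    else PySem.Int.ofChars? g                      -- int(m.group(1))

-- ===== PRECONDITION & SPEC =====
def Spec_extract_client_id_py (text : String) (out : Option Int) : Prop := out = extract_client_id_py_alt text
instance (text : String) (out : Option Int) : Decidable (Spec_extract_client_id_py text out) := by unfold Spec_extract_client_id_py; infer_instance

-- ===== CLAIM (what is proved, stated in full; the proofs are below) =====
def Claim_equal_extract_client_id_py : Prop := ∀ (text : String), Dom_extract_client_id_py text → Spec_extract_client_id_py text (extract_client_id_py text)

-- ===== LEMMAS AND PROOFS =====

-- first-occurrence decomposition
theorem mem_first_split {a : Char} {l : List Char} (h : a ∈ l) :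
    ∃ pre suf, l = pre ++ a :: suf ∧ a ∉ pre := by
  induction l with
  | nil => cases h
  | cons c t ih =>
    by_cases hc : c = a
    · exact ⟨[], t, by simp [hc], by simp⟩
    · have ht : a ∈ t := by
        rcases List.mem_cons.mp h with h1 | h1
        · exact absurd h1.symm hc
        · exact h1
      obtain ⟨pre, suf, hl, hpre⟩ := ih ht
      exact ⟨c :: pre, suf, by simp [hl], by simp [hpre]; exact fun h => hc (Eq.symm h)⟩

-- splitOnMax with maxsplit already exhausted returns the remainder
theorem splitOnMax_go_zero (sep : List Char) (fuel : Nat) (l cur : List Char)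
    (acc : List (List Char)) :
    PySem.Chars.splitOnMax.go sep fuel 0 l cur acc = ((cur.reverse ++ l) :: acc).reverse := by
  cases fuel with
  | zero => rfl
  | succ f =>
    cases l with
    | nil => simp [PySem.Chars.splitOnMax.go]
    | cons c t => simp [PySem.Chars.splitOnMax.go]

theorem splitOnMax_go_hash {pre : List Char} (hpre : '#' ∉ pre) :
    ∀ (fuel : Nat) (suf cur : List Char) (acc : List (List Char)),
      pre.length < fuel →
      PySem.Chars.splitOnMax.go ['#'] fuel 1 (pre ++ '#' :: suf) cur acc =
        acc.reverse ++ [cur.reverse ++ pre, suf] := by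
  induction pre with
  | nil =>
    intro fuel suf cur acc hf
    cases fuel with
    | zero => omega
    | succ f =>
      simp only [List.nil_append, PySem.Chars.splitOnMax.go]
      rw [if_neg (by omega), if_pos (by simp [List.isPrefixOf])]
      simp [splitOnMax_go_zero]
  | cons c t ih =>
    intro fuel suf cur acc hf
    cases fuel with
    | zero => simp at hf
    | succ f =>
      have hc : c ≠ '#' := fun h => hpre (h ▸ List.mem_cons_self)
      have hnp : ¬ (['#'].isPrefixOf (c :: (t ++ '#' :: suf)) = true) := by
        simp [List.isPrefixOf]; exact fun h => hc (Eq.symm h)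
      simp only [List.cons_append, PySem.Chars.splitOnMax.go]
      rw [if_neg (by omega), if_neg hnp]
      have := ih (fun h => hpre (List.mem_cons_of_mem _ h)) f suf (c :: cur) acc (by simp at hf; omega)
      rw [this]
      simp

theorem splitOnMax_hash {pre suf : List Char} (hpre : '#' ∉ pre) :
    PySem.Chars.splitOnMax (pre ++ '#' :: suf) ['#'] 1 = [pre, suf] := by
  unfold PySem.Chars.splitOnMax
  rw [if_neg (by norm_num)]
  have : ((1 : Int)).toNat = 1 := rfl
  rw [this, splitOnMax_go_hash hpre _ _ _ _ (by simp)]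
  simp

-- A's digit loop is takeWhile
theorem aDigits_toList (l : List Char) (s : String) :
    (aDigits l s).toList = s.toList ++ l.takeWhile PySem.Chars.isdigit := by
  induction l generalizing s with
  | nil => simp [aDigits]
  | cons c t ih =>
    by_cases hc : PySem.Chars.isdigit c
    · simp [aDigits, hc, ih, String.toList_push]
    · simp [aDigits, hc]

-- B's regex search on a string whose first '#' splits it as pre ++ '#' :: suf
theorem reSearch_hash {pre : List Char} (hpre : '#' ∉ pre) (suf : List Char) :
    reSearchHashDigits (pre ++ '#' :: suf) = some (suf.takeWhile PySem.Chars.isdigit) := by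
  induction pre with
  | nil => simp [reSearchHashDigits]
  | cons c t ih =>
    have hc : c ≠ '#' := fun h => hpre (h ▸ List.mem_cons_self)
    simp only [List.cons_append, reSearchHashDigits, if_neg hc]
    exact ih (fun h => hpre (List.mem_cons_of_mem _ h))

theorem reSearch_none {cs : List Char} (h : '#' ∉ cs) :
    reSearchHashDigits cs = none := by
  induction cs with
  | nil => rfl
  | cons c t ih =>
    have hc : c ≠ '#' := fun hh => h (hh ▸ List.mem_cons_self)
    simp only [reSearchHashDigits, if_neg hc]
    exact ih (fun hh => h (List.mem_cons_of_mem _ hh))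

-- ===== VERDICT (by name: the statement is the Claim_ definition above) =====
theorem extract_client_id_py_spec : Claim_equal_extract_client_id_py := by
  intro text _
  unfold Spec_extract_client_id_py
  by_cases hmem : '#' ∈ text.toList
  · obtain ⟨pre, suf, hcs, hpre⟩ := mem_first_split hmem
    have htl : ("#" : String).toList = ['#'] := rfl
    have hisin : PySem.Str.isIn "#" text = true := by
      rw [PySem.Str.isIn_iff_infix, htl, List.singleton_infix_iff]
      exact hmem
    have hsplit : PySem.Str.splitMax? text "#" 1 = some [String.ofList pre, String.ofList suf] := by
      show Option.map _ (PySem.Chars.splitMax? text.toList ("#" : String).toList 1) = _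
      rw [htl, hcs]
      show Option.map _ (some (PySem.Chars.splitOnMax (pre ++ '#' :: suf) ['#'] 1)) = _
      rw [splitOnMax_hash hpre]; rfl
    have hpart : PySem.List.pyGetD [String.ofList pre, String.ofList suf] 1 "" = String.ofList suf := rfl
    have hdig : aDigits suf "" = String.ofList (suf.takeWhile PySem.Chars.isdigit) := by
      apply String.ext
      rw [aDigits_toList]
      simp
    simp only [extract_client_id_py, extract_client_id_py_alt, hisin, hsplit,
      Option.getD_some, hpart, String.toList_ofList, hdig, hcs, reSearch_hash hpre]
    rw [if_neg (by simp)]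
    by_cases hz : suf.takeWhile PySem.Chars.isdigit = []
    · rw [if_pos hz, hz]
      rfl
    · rw [if_neg hz, PySem.Int.ofStr?_ofList]
  · have hnone : reSearchHashDigits text.toList = none := reSearch_none hmem
    have hisin : PySem.Str.isIn "#" text = false := by
      show PySem.Chars.isIn _ _ = false
      rw [PySem.Chars.isIn_eq_false_iff,
          show ("#" : String).toList = ['#'] from rfl, List.singleton_infix_iff]
      exact hmem
    simp only [extract_client_id_py, extract_client_id_py_alt, hisin, hnone, if_true]
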